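-- pv_equiv track=rewrite | github.com/wanthigh/python-build-standalone | ci-matrix.py | find_runner
-- ===== SOURCE A (Python) =====
-- from typing import Any, Optional
--
-- def find_runner(runners: dict[str, Any], platform: str, arch: str) -> str:
--     # Find a matching platform first
--     match_platform = [
--         runner for runner in runners if runners[runner]["platform"] == platform
--     ]
--
--     # Then, find a matching architecture
--     match_arch = [
--         runner for runner in match_platform if runners[runner]["arch"] == arch
--     ]
--
--     # If there's a matching architecture, use that
--     if match_arch:
--         return match_arch[0]
--
--     # Otherwise, use the first with a matching platform
--     if match_platform:
--         return match_platform[0]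
--
--     raise RuntimeError(f"No runner found for platform {platform!r} and arch {arch!r}")
-- ===== SOURCE B (Python) =====
-- def find_runner(runners, platform, arch):
--     # Rank every runner (2 = platform+arch match, 1 = platform only, 0 = no
--     # match) and select the highest-ranked one, earliest index winning ties.
--     scored = [
--         ((2 if info["arch"] == arch else 1) if info["platform"] == platform else 0,
--          i, name)
--         for i, (name, info) in enumerate(runners.items())
--     ]
--     if scored:
--         best = max(scored, key=lambda t: (t[0], -t[1]))
--         if best[0] > 0:
--             return best[2]
--     raise RuntimeError(f"No runner found for platform {platform!r} and arch {arch!r}")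
-- ===== Notes on version B (the rewrite author's own statement) =====
-- stated objective: alternative
-- what changed: Instead of A's staged filtering (first filter by platform, then by arch, then pick the head of one of the two lists), B assigns every runner a numeric rank (2/1/0) in one comprehension and selects the winner by a single max with a (rank, -index) key, so the answer is an argmax rather than the head of a filter chain.
import Mathlib
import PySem

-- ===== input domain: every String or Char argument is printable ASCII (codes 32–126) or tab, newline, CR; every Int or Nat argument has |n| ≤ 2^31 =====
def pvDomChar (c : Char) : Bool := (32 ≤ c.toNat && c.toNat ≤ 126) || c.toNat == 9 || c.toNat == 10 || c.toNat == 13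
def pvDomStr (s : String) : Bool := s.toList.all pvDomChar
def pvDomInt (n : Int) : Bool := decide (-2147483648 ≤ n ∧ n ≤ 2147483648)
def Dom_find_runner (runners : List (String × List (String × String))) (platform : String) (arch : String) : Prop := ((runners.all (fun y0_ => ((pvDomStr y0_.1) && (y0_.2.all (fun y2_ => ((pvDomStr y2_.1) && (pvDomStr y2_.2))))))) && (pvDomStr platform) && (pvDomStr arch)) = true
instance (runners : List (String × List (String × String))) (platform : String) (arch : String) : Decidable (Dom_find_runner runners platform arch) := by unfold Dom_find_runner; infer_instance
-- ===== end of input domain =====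

-- ===== PORT A =====
-- B ranks every runner (2/1/0) and picks the argmax under (rank, -index); A filters in stages.
-- pvField runners r key = runners[r][key] with "" for a missing key (missing keys are excluded by Pre_)
def pvField (runners : List (String × List (String × String))) (r key : String) : String :=
  PySem.Dict.getD (PySem.Dict.mk ((PySem.Dict.mk runners).getD r [])) key ""

def find_runner (runners : List (String × List (String × String))) (platform : String) (arch : String) : String :=
  let match_platform := (runners.map Prod.fst).filter (fun r => pvField runners r "platform" == platform)
  let match_arch := match_platform.filter (fun r => pvField runners r "arch" == arch)
  match match_arch with
  | a :: _ => a
  | [] =>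
    match match_platform with
    | p :: _ => p
    | [] => ""  -- Python raises RuntimeError here; excluded by Pre_find_runner

-- ===== PORT B =====
-- rank of one runner's info dict: 2 = platform+arch match, 1 = platform only, 0 = no match
def pvScore (platform arch : String) (info : List (String × String)) : Int :=
  if PySem.Dict.getD (PySem.Dict.mk info) "platform" "" == platform then
    (if PySem.Dict.getD (PySem.Dict.mk info) "arch" "" == arch then 2 else 1)
  else 0

-- Python's lexicographic '>' on the key tuple (t[0], -t[1])
def pvKeyGt (x b : Int × Int × String) : Bool :=
  x.1 > b.1 || (x.1 == b.1 && -x.2.1 > -b.2.1)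

def find_runner_alt (runners : List (String × List (String × String))) (platform : String) (arch : String) : String :=
  let scored := (PySem.List.enumerate runners).map
    (fun p => (pvScore platform arch p.2.2, p.1, p.2.1))
  match scored with
  | [] => ""  -- Python raises RuntimeError here; excluded by Pre_find_runner
  | h :: t =>
    -- max(scored, key=...) = running fold keeping the first maximal element
    let best := t.foldl (fun b x => if pvKeyGt x b then x else b) h
    if best.1 > 0 then best.2.2 else ""  -- Python raises RuntimeError; excluded by Pre_find_runner

-- ===== PRECONDITION & SPEC =====
-- Pre_ excludes inputs where the Python A raises (a runner missing the "platform" key, a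
-- platform-matching runner missing the "arch" key, or no runner matching the platform at all →
-- KeyError / RuntimeError), and association lists with duplicate keys, which cannot arise from a
-- Python dict (dict construction keeps the last value while the port's lookup is first-match).
def Pre_find_runner (runners : List (String × List (String × String))) (platform : String) (arch : String) : Prop :=
  (runners.map Prod.fst).Nodup ∧
  (∀ p ∈ runners, (p.2.map Prod.fst).Nodup ∧ ((PySem.Dict.mk p.2).get? "platform").isSome) ∧
  (∀ p ∈ runners, (PySem.Dict.mk p.2).get? "platform" = some platform →
      ((PySem.Dict.mk p.2).get? "arch").isSome) ∧
  (∃ p ∈ runners, (PySem.Dict.mk p.2).get? "platform" = some platform)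
instance (runners : List (String × List (String × String))) (platform : String) (arch : String) : Decidable (Pre_find_runner runners platform arch) := by unfold Pre_find_runner; infer_instance

def pvWitness_find_runner : (List (String × List (String × String))) × String × String :=
  ([("r1", [("platform", "linux"), ("arch", "x86")]), ("r2", [("platform", "mac"), ("arch", "arm")])], "mac", "arm")

def Spec_find_runner (runners : List (String × List (String × String))) (platform : String) (arch : String) (out : String) : Prop := out = find_runner_alt runners platform arch
instance (runners : List (String × List (String × String))) (platform : String) (arch : String) (out : String) : Decidable (Spec_find_runner runners platform arch out) := by unfold Spec_find_runner; infer_instance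

-- ===== CLAIM =====
def Claim_equal_find_runner : Prop := ∀ (runners : List (String × List (String × String))) (platform : String) (arch : String), Dom_find_runner runners platform arch → Pre_find_runner runners platform arch → Spec_find_runner runners platform arch (find_runner runners platform arch)

-- ===== LEMMAS AND PROOFS =====

-- first-match lookup of a present key in a nodup association list gives that pair's value
lemma pvGet_mk_of_nodup {nu : Type} (l : List (String × nu))
    (hnd : (l.map Prod.fst).Nodup) (p : String × nu) (hp : p ∈ l) :
    (PySem.Dict.mk l).get? p.1 = some p.2 := by
  induction l with
  | nil => cases hp
  | cons q l ih =>
    simp only [List.map_cons, List.nodup_cons] at hnd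
    rcases List.mem_cons.mp hp with h | h
    · subst h; simp [PySem.Dict.get?]
    · have hne : q.1 ≠ p.1 := fun he => hnd.1 (he ▸ List.mem_map_of_mem h)
      rw [PySem.Dict.get?_mk_cons]
      simp [hne, ih hnd.2 h]

-- characterization of the running-max fold over a score-2-bounded list with strictly
-- increasing indices: it returns the current best if its score is maximal, else the
-- first later element of strictly greater score (2 beats 1 beats 0)
lemma pvFoldBest (l : List (Int × Int × String)) (b : Int × Int × String)
    (hb : b.1 = 0 ∨ b.1 = 1 ∨ b.1 = 2)
    (hl : ∀ x ∈ l, x.1 = 0 ∨ x.1 = 1 ∨ x.1 = 2)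
    (hgt : ∀ x ∈ l, b.2.1 < x.2.1)
    (hpw : l.Pairwise (fun x y => x.2.1 < y.2.1)) :
    l.foldl (fun b x => if pvKeyGt x b then x else b) b =
      (if b.1 = 2 then b else
       match l.find? (fun x => x.1 == 2) with
       | some x => x
       | none =>
         if b.1 = 1 then b else
         match l.find? (fun x => x.1 == 1) with
         | some y => y
         | none => b) := by
  induction l generalizing b with
  | nil => rcases hb with h | h | h <;> simp [h]
  | cons x l ih =>
    have hxl := hl x (List.mem_cons_self ..)
    have hbx : b.2.1 < x.2.1 := hgt x (List.mem_cons_self ..)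
    have hpw' := (List.pairwise_cons.mp hpw)
    have hl' : ∀ y ∈ l, y.1 = 0 ∨ y.1 = 1 ∨ y.1 = 2 :=
      fun y hy => hl y (List.mem_cons_of_mem _ hy)
    have hkey : pvKeyGt x b = decide (b.1 < x.1) := by
      unfold pvKeyGt
      have h2 : decide (-x.2.1 > -b.2.1) = false := by simp; omega
      by_cases h : b.1 < x.1 <;> simp [h, h2, gt_iff_lt] <;> omega
    rw [List.foldl_cons]
    by_cases hrep : b.1 < x.1
    · have hk : pvKeyGt x b = true := by rw [hkey]; exact decide_eq_true hrep
      rw [if_pos hk, ih x hxl hl' hpw'.1 hpw'.2]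
      rcases hb with hb0 | hb0 | hb0 <;> rcases hxl with hx0 | hx0 | hx0 <;>
        first
        | omega
        | (cases hF : l.find? (fun y => y.1 == 2) <;>
           cases hG : l.find? (fun y => y.1 == 1) <;>
           simp [hb0, hx0, List.find?_cons, hF, hG])
    · have hk : pvKeyGt x b = false := by rw [hkey]; simpa using hrep
      rw [if_neg (by simp [hk]),
          ih b hb hl' (fun y hy => lt_trans hbx (hpw'.1 y hy)) hpw'.2]
      rcases hb with hb0 | hb0 | hb0 <;> rcases hxl with hx0 | hx0 | hx0 <;>
        first
        | omega
        | (cases hF : l.find? (fun y => y.1 == 2) <;>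
           cases hG : l.find? (fun y => y.1 == 1) <;>
           simp [hb0, hx0, List.find?_cons, hF, hG])

-- membership in an enumeration starts at the start index
lemma pvEnum_index_ge {alpha : Type} (rs : List alpha) (i : Int)
    (p : Int × alpha) (hp : p ∈ PySem.List.enumerate rs i) : i ≤ p.1 := by
  rcases (PySem.List.mem_enumerate_iff rs i p).mp hp with ⟨k, hk, rfl⟩
  simp

-- find? over an enumeration with a predicate on the element only, projected to the element
lemma pvEnumFindSnd {alpha : Type} (q : alpha → Bool) (rs : List alpha) (i : Int) :
    ((PySem.List.enumerate rs i).find? (fun p => q p.2)).map (·.2) = rs.find? q := by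
  induction rs generalizing i with
  | nil => simp [PySem.List.enumerate_nil]
  | cons r rs ih =>
    rw [PySem.List.enumerate_cons]
    by_cases h : q r = true
    · simp [List.find?_cons, h]
    · simp only [Bool.not_eq_true] at h
      simp [List.find?_cons, h, ih]

-- find? respects pointwise-equal predicates on the list's members
lemma pvFindCongr {alpha : Type} (l : List alpha) (p p' : alpha → Bool)
    (h : ∀ x ∈ l, p x = p' x) : l.find? p = l.find? p' := by
  induction l with
  | nil => rfl
  | cons x l ih =>
    rw [List.find?_cons, List.find?_cons, h x (List.mem_cons_self ..),
        ih (fun y hy => h y (List.mem_cons_of_mem _ hy))]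

-- the rank tests, expressed as the platform/arch match tests
lemma pvScore_eq_two (platform arch : String) (p2 : List (String × String)) :
    (pvScore platform arch p2 == 2) =
      ((PySem.Dict.getD (PySem.Dict.mk p2) "platform" "" == platform) &&
       (PySem.Dict.getD (PySem.Dict.mk p2) "arch" "" == arch)) := by
  unfold pvScore; split_ifs with h1 h2 <;> simp [h1] <;> simp_all

lemma pvScore_eq_one (platform arch : String) (p2 : List (String × String)) :
    (pvScore platform arch p2 == 1) =
      ((PySem.Dict.getD (PySem.Dict.mk p2) "platform" "" == platform) &&
       !(PySem.Dict.getD (PySem.Dict.mk p2) "arch" "" == arch)) := by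
  unfold pvScore; split_ifs with h1 h2 <;> simp [h1] <;> simp_all

lemma pvScore_mem (platform arch : String) (p2 : List (String × String)) :
    pvScore platform arch p2 = 0 ∨ pvScore platform arch p2 = 1 ∨ pvScore platform arch p2 = 2 := by
  unfold pvScore; split_ifs <;> simp

-- ===== VERDICT =====
theorem find_runner_spec : Claim_equal_find_runner := by
  intro runners platform arch _ hpre
  obtain ⟨hnd, _, _, _⟩ := hpre
  unfold Spec_find_runner find_runner find_runner_alt
  set pred1 : String × List (String × String) → Bool :=
    fun p => PySem.Dict.getD (PySem.Dict.mk p.2) "platform" "" == platform with hpred1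
  set pred2 : String × List (String × String) → Bool :=
    fun p => pred1 p && (PySem.Dict.getD (PySem.Dict.mk p.2) "arch" "" == arch) with hpred2
  set qs2 : String × List (String × String) → Bool :=
    fun p => pvScore platform arch p.2 == 2 with hqs2
  set qs1 : String × List (String × String) → Bool :=
    fun p => pvScore platform arch p.2 == 1 with hqs1
  have hq2p : ∀ p, qs2 p = pred2 p := fun p => by
    simp only [hqs2, hpred2, hpred1, pvScore_eq_two]
  have hq1p : ∀ p, qs1 p = (pred1 p && !(PySem.Dict.getD (PySem.Dict.mk p.2) "arch" "" == arch)) :=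
    fun p => by simp only [hqs1, hpred1, pvScore_eq_one]
  -- A's side: the two filters, rewritten to filters over the pairs
  have hfield : ∀ p ∈ runners, ∀ key,
      pvField runners p.1 key = PySem.Dict.getD (PySem.Dict.mk p.2) key "" := by
    intro p hp key
    have h2 : (PySem.Dict.mk runners).getD p.1 [] = p.2 := by
      simp [PySem.Dict.getD, pvGet_mk_of_nodup runners hnd p hp]
    unfold pvField
    rw [h2]
  have hmp : (runners.map Prod.fst).filter (fun r => pvField runners r "platform" == platform)
      = (runners.filter pred1).map Prod.fst := by
    rw [List.filter_map]
    congr 1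
    exact List.filter_congr (fun p hp => by simp [Function.comp, hfield p hp "platform", hpred1])
  have hma : ((runners.filter pred1).map Prod.fst).filter (fun r => pvField runners r "arch" == arch)
      = (runners.filter pred2).map Prod.fst := by
    rw [List.filter_map, List.filter_filter]
    congr 1
    apply List.filter_congr
    intro p hp
    simp [Function.comp, hfield p hp "arch", hpred2, Bool.and_comm]
  -- B's side: peel the enumeration
  cases runners with
  | nil =>
    simp [PySem.List.enumerate_nil]
  | cons r rs =>
    rw [PySem.List.enumerate_cons]
    set f : Int × (String × List (String × String)) → Int × Int × String :=
      fun p => (pvScore platform arch p.2.2, p.1, p.2.1) with hf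
    set h0 : Int × Int × String := f (0, r) with hh0
    set t : List (Int × Int × String) := (PySem.List.enumerate rs (0 + 1)).map f with ht
    have hmapcons : ((0, r) :: PySem.List.enumerate rs (0 + 1)).map f = h0 :: t := by
      simp [hh0, ht]
    rw [hmapcons]
    dsimp only
    rw [hmp, hma]
    -- fold characterization, merged over the whole scored list
    have hl2 : ∀ x ∈ t, x.1 = 0 ∨ x.1 = 1 ∨ x.1 = 2 := by
      intro x hx
      rcases List.mem_map.mp (ht ▸ hx) with ⟨p, _, rfl⟩
      exact pvScore_mem platform arch p.2.2
    have hgt : ∀ x ∈ t, h0.2.1 < x.2.1 := by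
      intro x hx
      rcases List.mem_map.mp (ht ▸ hx) with ⟨p, hp, rfl⟩
      have := pvEnum_index_ge rs (0 + 1) p hp
      simp only [hh0, hf]
      omega
    have hpw : t.Pairwise (fun x y => x.2.1 < y.2.1) := by
      rw [ht]
      exact (List.pairwise_map).mpr
        ((PySem.List.pairwise_lt_enumerate rs (0 + 1)).imp (fun h => by simpa [hf] using h))
    have hh0v : h0.1 = pvScore platform arch r.2 := by simp [hh0, hf]
    have hfold := pvFoldBest t h0 (hh0 ▸ pvScore_mem platform arch r.2) hl2 hgt hpw
    have hmerge : t.foldl (fun b x => if pvKeyGt x b then x else b) h0 =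
        (match (h0 :: t).find? (fun x => x.1 == 2) with
         | some x => x
         | none =>
           match (h0 :: t).find? (fun x => x.1 == 1) with
           | some y => y
           | none => h0) := by
      rw [hfold]
      rcases pvScore_mem platform arch r.2 with h | h | h <;>
        cases hF : t.find? (fun y => y.1 == 2) <;>
        cases hG : t.find? (fun y => y.1 == 1) <;>
        simp [hh0v, h, hF, hG]
    rw [hmerge]
    -- find? over the scored list = find? over the runners, projected
    have hfind : ∀ s : Int, ∀ q : String × List (String × String) → Bool,
        (∀ p, (pvScore platform arch p.2 == s) = q p) →
        ((h0 :: t).find? (fun x => x.1 == s)).map (fun x => (x.1, x.2.2)) =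
          ((r :: rs).find? q).map (fun p => (pvScore platform arch p.2, p.1)) := by
      intro s q hq
      rw [← hmapcons, List.find?_map]
      have hcomp : ((fun x : Int × Int × String => x.1 == s) ∘ f) =
          (fun p : Int × (String × List (String × String)) => q p.2) := by
        funext p; simp [hf, hq p.2]
      rw [hcomp]
      have := pvEnumFindSnd q (r :: rs) 0
      rw [PySem.List.enumerate_cons] at this
      cases hE : (((0, r) :: PySem.List.enumerate rs (0 + 1)).find? (fun p => q p.2)) with
      | none => rw [hE] at this; simp at this; simp [← this]
      | some e =>
        rw [hE] at this
        simp only [Option.map_some] at this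
        rw [← this]
        simp [hf]
    -- case split on the two find?s over runners
    cases hF2 : (r :: rs).find? qs2 with
    | some x =>
      have hx2 := hfind 2 qs2 (fun p => rfl)
      rw [hF2] at hx2
      have hqx : qs2 x = true := List.find?_some hF2
      have hsx : pvScore platform arch x.2 = 2 := by simpa [hqs2] using hqx
      have hA2 : (r :: rs).find? pred2 = some x := by
        rw [← pvFindCongr _ qs2 pred2 (fun p _ => hq2p p), hF2]
      cases hS2 : ((h0 :: t).find? (fun x => x.1 == 2)) with
      | none => rw [hS2] at hx2; simp at hx2
      | some e =>
        rw [hS2] at hx2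
        simp only [Option.map_some, Option.some.injEq] at hx2
        have he1 : e.1 = 2 := by have := congrArg Prod.fst hx2; simpa [hsx] using this
        have he2 : e.2.2 = x.1 := by have := congrArg Prod.snd hx2; simpa using this
        have hhd : (List.filter pred2 (r :: rs)).head? = some x := by
          rw [List.head?_filter, hA2]
        cases hC : List.filter pred2 (r :: rs) with
        | nil => rw [hC] at hhd; exact absurd hhd (by simp)
        | cons a tl =>
          rw [hC] at hhd
          simp only [List.head?_cons, Option.some.injEq] at hhd
          rw [List.map_cons]
          simp [hhd, he1, he2]
    | none =>
      have hx2 := hfind 2 qs2 (fun p => rfl)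
      rw [hF2] at hx2
      have hS2 : ((h0 :: t).find? (fun x => x.1 == 2)) = none := by
        cases hS : ((h0 :: t).find? (fun x => x.1 == 2)) with
        | none => rfl
        | some e => rw [hS] at hx2; simp at hx2
      rw [hS2]
      have hno2 : ∀ p ∈ (r :: rs), qs2 p = false := by
        intro p hp
        have := List.find?_eq_none.mp hF2 p hp
        simpa using this
      have hA2 : (r :: rs).find? pred2 = none := by
        rw [← pvFindCongr _ qs2 pred2 (fun p _ => hq2p p), hF2]
      have hC2 : List.filter pred2 (r :: rs) = [] := by
        have := List.head?_filter (p := pred2) (l := r :: rs)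
        rw [hA2] at this
        exact List.head?_eq_none_iff.mp this
      rw [hC2, List.map_nil]
      have hpred1q : ∀ p ∈ (r :: rs), pred1 p = qs1 p := by
        intro p hp
        have h2 : (pvScore platform arch p.2 == 2) = false := by
          simpa [hqs2] using hno2 p hp
        rw [hq1p p]
        by_cases hA : (PySem.Dict.getD (PySem.Dict.mk p.2) "arch" "" == arch) = true
        · have := (pvScore_eq_two platform arch p.2)
          rw [h2] at this
          cases hP : pred1 p
          · simp [hA]
          · exfalso; rw [hpred1] at hP; simp [hP, hA] at this
        · simp only [Bool.not_eq_true] at hA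
          simp [hA]
      cases hF1 : (r :: rs).find? qs1 with
      | some y =>
        have hx1 := hfind 1 qs1 (fun p => rfl)
        rw [hF1] at hx1
        have hqy : qs1 y = true := List.find?_some hF1
        have hsy : pvScore platform arch y.2 = 1 := by simpa [hqs1] using hqy
        cases hS1 : ((h0 :: t).find? (fun x => x.1 == 1)) with
        | none => rw [hS1] at hx1; simp at hx1
        | some e =>
          rw [hS1] at hx1
          simp only [Option.map_some, Option.some.injEq] at hx1
          have he1 : e.1 = 1 := by have := congrArg Prod.fst hx1; simpa [hsy] using this
          have he2 : e.2.2 = y.1 := by have := congrArg Prod.snd hx1; simpa using this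
          have hA1 : (r :: rs).find? pred1 = some y := by
            rw [pvFindCongr _ pred1 qs1 hpred1q, hF1]
          have hhd : (List.filter pred1 (r :: rs)).head? = some y := by
            rw [List.head?_filter, hA1]
          cases hC : List.filter pred1 (r :: rs) with
          | nil => rw [hC] at hhd; exact absurd hhd (by simp)
          | cons a tl =>
            rw [hC] at hhd
            simp only [List.head?_cons, Option.some.injEq] at hhd
            rw [List.map_cons]
            simp [hhd, he1, he2]
      | none =>
        have hx1 := hfind 1 qs1 (fun p => rfl)
        rw [hF1] at hx1
        have hS1 : ((h0 :: t).find? (fun x => x.1 == 1)) = none := by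
          cases hS : ((h0 :: t).find? (fun x => x.1 == 1)) with
          | none => rfl
          | some e => rw [hS] at hx1; simp at hx1
        rw [hS1]
        have hA1 : (r :: rs).find? pred1 = none := by
          rw [pvFindCongr _ pred1 qs1 hpred1q, hF1]
        have hC1 : List.filter pred1 (r :: rs) = [] := by
          have := List.head?_filter (p := pred1) (l := r :: rs)
          rw [hA1] at this
          exact List.head?_eq_none_iff.mp this
        rw [hC1, List.map_nil]
        have hh01 : h0.1 = 0 := by
          have h2 : qs2 r = false := hno2 r (List.mem_cons_self ..)
          have h1 : qs1 r = false := by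
            have := List.find?_eq_none.mp hF1 r (List.mem_cons_self ..)
            simpa using this
          rcases pvScore_mem platform arch r.2 with h | h | h
          · simp [hh0, hf, h]
          · simp [hqs1, h] at h1
          · simp [hqs2, h] at h2
        simp [hh01]
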